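-- pv_equiv track=rewrite | github.com/ol287/ECM3428 | Week_8_CRC.py | crc_ccitt
-- ===== SOURCE A (Python) =====
-- def crc_ccitt(data: str, poly: int = 0x1021, init_crc: int = 0xFFFF) -> str:
--     """
--     Compute the CRC-CCITT checksum for a given data string.
--
--     :param data: The input data as a binary string (e.g., "1101011011").
--     :param poly: The CRC polynomial in hexadecimal (default: x16 + x12 + x5 + 1 -> 0x1021).
--     :param init_crc: The initial value of the CRC (default: 0xFFFF).
--     :return: The calculated CRC as a binary string.
--     """
--     crc = init_crc
--
--     # Process each bit in the data
--     for bit in data: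
--         crc ^= int(bit) << 15  # Align the input bit with the CRC's MSB
--
--         for _ in range(8):  # Process each bit in the CRC register
--             if crc & 0x8000:  # If MSB is 1, shift and XOR with the polynomial
--                 crc = (crc << 1) ^ poly
--             else:  # Otherwise, just shift left
--                 crc <<= 1
--
--             crc &= 0xFFFF  # Keep CRC to 16 bits
--
--     return f"{crc:016b}"  # Return CRC as a 16-bit binary string
-- ===== SOURCE B (Python) =====
-- def crc_ccitt(data: str, poly: int = 0x1021, init_crc: int = 0xFFFF) -> str:
--     # Table-driven CRC built by linearity: the inner 8-step loop is a linear
--     # map over GF(2), so the 256-entry table is grown by doubling — start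
--     # from [0], and each round appends the current block XORed with t, where
--     # t walks through the table values of the powers of two (t for index 1
--     # is the polynomial itself, each next power is one shift/XOR step).
--     table = [0]
--     t = poly & 0xFFFF
--     for _ in range(8):
--         table = table + [t ^ e for e in table]
--         t = ((t << 1) ^ poly) & 0xFFFF if t & 0x8000 else (t << 1) & 0xFFFF
--
--     crc = init_crc
--     for ch in data:
--         x = crc ^ (int(ch) << 15)
--         crc = ((x << 8) ^ table[(x >> 8) & 0xFF]) & 0xFFFF
--     return "{:016b}".format(crc)
-- ===== Notes on version B (the rewrite author's own statement) =====
-- stated objective: faster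
-- what changed: Replaces the 8-iteration shift/XOR inner loop per character by a 256-entry table built once by doubling (the 8-step map is GF(2)-linear, so each round appends the previous block XORed with the table value of the next power of two, starting from the polynomial) plus one masked table lookup per character.
import Mathlib
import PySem

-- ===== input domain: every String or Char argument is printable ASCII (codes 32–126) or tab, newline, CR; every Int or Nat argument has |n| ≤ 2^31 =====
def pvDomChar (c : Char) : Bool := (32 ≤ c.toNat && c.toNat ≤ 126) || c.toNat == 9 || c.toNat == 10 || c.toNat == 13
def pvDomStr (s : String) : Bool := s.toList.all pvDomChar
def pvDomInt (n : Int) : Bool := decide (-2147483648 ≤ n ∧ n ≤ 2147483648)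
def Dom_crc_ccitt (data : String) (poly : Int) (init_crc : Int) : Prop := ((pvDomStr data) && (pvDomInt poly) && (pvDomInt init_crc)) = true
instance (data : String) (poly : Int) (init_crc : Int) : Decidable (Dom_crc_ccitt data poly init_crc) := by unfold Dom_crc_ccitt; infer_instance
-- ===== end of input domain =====

-- B replaces A's 8-iteration shift/XOR inner loop per character by a 256-entry table built once by
-- doubling (the 8-step map is GF(2)-linear, so each round appends the previous block XORed with the
-- table value of the next power of two) plus one masked table lookup per character.

-- f"{crc:016b}" / "{:016b}".format(crc): binary digits zero-padded to total width 16, a '-' sign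
-- counted in the width (hand port, exact for every Int; PySem.Int.toBinChars is format(n,'b'))
def pvFmt016b (n : Int) : String :=
  match PySem.Int.toBinChars n with
  | '-' :: rest => String.mk ('-' :: (List.replicate (15 - rest.length) '0' ++ rest))
  | s => String.mk (List.replicate (16 - s.length) '0' ++ s)

-- ===== PORT A =====
-- body of A's inner 8-iteration loop: branch on crc & 0x8000, then crc &= 0xFFFF
def pvStepA (poly c : Int) : Int :=
  PySem.Int.band (if PySem.Int.band c 32768 ≠ 0 then PySem.Int.bxor (c <<< (1:Nat)) poly else c <<< (1:Nat)) 65535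

def crcA_inner (poly crc : Int) : Int :=
  (PySem.List.pyRange 0 8 1).foldl (fun c _ => pvStepA poly c) crc

-- outer loop; none = int(bit) raised ValueError (excluded by Pre_)
def crcA_go (poly : Int) : List Char → Int → Option Int
  | [], crc => some crc
  | b :: rest, crc =>
    match PySem.Int.ofStr? (String.mk [b]) with
    | none => none
    | some d => crcA_go poly rest (crcA_inner poly (PySem.Int.bxor crc (d <<< (15:Nat))))

def crc_ccitt (data : String) (poly : Int) (init_crc : Int) : String :=
  match crcA_go poly data.toList init_crc with
  | some crc => pvFmt016b crc
  | none => ""   -- unreachable under Pre_ (Python raises ValueError)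

-- ===== PORT B =====
-- Source B's table build: start from [0]; each of 8 rounds does
--   table = table + [t ^ e for e in table]   then updates t by one shift/XOR step
def crcB_table (poly : Int) : List Int :=
  ((PySem.List.pyRange 0 8 1).foldl
    (fun (st : List Int × Int) _ =>
      (st.1 ++ st.1.map (fun e => PySem.Int.bxor st.2 e),
       if PySem.Int.band st.2 32768 ≠ 0 then PySem.Int.band (PySem.Int.bxor (st.2 <<< (1:Nat)) poly) 65535
       else PySem.Int.band (st.2 <<< (1:Nat)) 65535))
    ([0], PySem.Int.band poly 65535)).1

-- one character of Source B's loop; none propagates a ValueError of int(ch)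
def crcB_step (table : List Int) (acc : Option Int) (ch : Char) : Option Int :=
  acc.bind fun crc =>
    (PySem.Int.ofStr? (String.mk [ch])).map fun (d : Int) =>
      let x := PySem.Int.bxor crc (d <<< (15:Nat))
      PySem.Int.band (PySem.Int.bxor (x <<< (8:Nat))
        ((PySem.List.pyGet? table (PySem.Int.band (x >>> (8:Nat)) 255)).getD 0)) 65535

def crc_ccitt_alt (data : String) (poly : Int) (init_crc : Int) : String :=
  match data.toList.foldl (crcB_step (crcB_table poly)) (some init_crc) with
  | some crc => pvFmt016b crc
  | none => ""

-- ===== PRECONDITION & SPEC =====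
-- Pre_ excludes exactly the inputs where Python A raises ValueError: int(bit) fails on any non-digit character.
def Pre_crc_ccitt (data : String) (poly : Int) (init_crc : Int) : Prop :=
  (data.toList.all (fun c => decide ('0' ≤ c) && decide (c ≤ '9'))) = true
instance (data : String) (poly : Int) (init_crc : Int) : Decidable (Pre_crc_ccitt data poly init_crc) := by
  unfold Pre_crc_ccitt; infer_instance

def pvWitness_crc_ccitt : String × Int × Int := ("1011", 4129, 65535)

def Spec_crc_ccitt (data : String) (poly : Int) (init_crc : Int) (out : String) : Prop :=
  out = crc_ccitt_alt data poly init_crc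
instance (data : String) (poly : Int) (init_crc : Int) (out : String) : Decidable (Spec_crc_ccitt data poly init_crc out) := by
  unfold Spec_crc_ccitt; infer_instance

-- ===== CLAIM (what is proved, stated in full; the proofs are below) =====
def Claim_equal_crc_ccitt : Prop := ∀ (data : String) (poly : Int) (init_crc : Int), Dom_crc_ccitt data poly init_crc → Pre_crc_ccitt data poly init_crc → Spec_crc_ccitt data poly init_crc (crc_ccitt data poly init_crc)

-- ===== LEMMAS AND PROOFS =====

-- low 16 bits of an Int (its value mod 2^16), as a Nat
def pvLow (x : Int) : Nat := (x % 65536).toNat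

-- Nat model of one iteration of A's inner loop (q = low 16 bits of poly)
def pvNStep (q c : Nat) : Nat :=
  if c.testBit 15 then ((2*c) % 65536) ^^^ q else (2*c) % 65536

def pvNIter : Nat → Nat → Nat → Nat
  | 0, _, c => c
  | n+1, q, c => pvNIter n q (pvNStep q c)

-- ---- generic Nat bit facts ----
lemma pv_add_disj (a : Nat) : ∀ b : Nat, a &&& b = 0 → a + b = a ^^^ b := by
  induction a using Nat.strongRecOn with
  | ind a ih =>
    intro b h
    rcases Nat.eq_zero_or_pos a with rfl | hpos
    · simp
    have hd : a/2 &&& b/2 = 0 := by rw [← Nat.and_div_two, h]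
    have ih2 := ih (a/2) (Nat.div_lt_self hpos one_lt_two) (b/2) hd
    have hpar : a % 2 = 0 ∨ b % 2 = 0 := by
      have h0 := Nat.testBit_and a b 0
      rw [h] at h0
      simp only [Nat.testBit_zero] at h0
      rcases Bool.and_eq_false_iff.mp h0.symm with h1 | h1 <;> simp at h1 <;> omega
    have hx2 : (a ^^^ b) / 2 = a/2 ^^^ b/2 := Nat.xor_div_two
    have hxm : (a ^^^ b) % 2 = (a + b) % 2 := Nat.xor_mod_two_eq
    omega

lemma pv_sub_xor (a b : Nat) (h : b &&& a = b) : a - b = a ^^^ b := by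
  have hsub : ∀ i, b.testBit i = true → a.testBit i = true := by
    intro i hb
    have hi := congrArg (fun x => x.testBit i) h
    simp only [Nat.testBit_and, hb, Bool.true_and] at hi
    exact hi
  have hdis : (a ^^^ b) &&& b = 0 := by
    apply Nat.eq_of_testBit_eq
    intro i
    simp only [Nat.testBit_and, Nat.testBit_xor, Nat.zero_testBit]
    by_cases hb : b.testBit i = true
    · simp [hb, hsub i hb]
    · simp [hb]
  have hadd := pv_add_disj (a ^^^ b) b hdis
  have hc : (a ^^^ b) ^^^ b = a := Nat.xor_xor_cancel_right a b
  omega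

lemma pv_tb_65535 (i : Nat) : (65535 : Nat).testBit i = decide (i < 16) := by
  rw [show (65535:Nat) = 2^16 - 1 by norm_num, Nat.testBit_two_pow_sub_one]

lemma pv_tb_mod (x i : Nat) : (x % 65536).testBit i = (decide (i < 16) && x.testBit i) := by
  rw [show (65536:Nat) = 2^16 by norm_num, Nat.testBit_mod_two_pow]

lemma pv_tb_high {x : Nat} (i : Nat) (hx : x < 65536) (hi : 16 ≤ i) : x.testBit i = false := by
  apply Nat.testBit_lt_two_pow
  calc x < 65536 := hx
    _ = 2^16 := by norm_num
    _ ≤ 2^i := Nat.pow_le_pow_right (by norm_num) hi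

lemma pv_and_65535 (x : Nat) : x &&& 65535 = x % 65536 := by
  rw [show (65535:Nat) = 2^16 - 1 by norm_num, Nat.and_two_pow_sub_one_eq_mod]

lemma pv_and_255 (x : Nat) : x &&& 255 = x % 256 := by
  rw [show (255:Nat) = 2^8 - 1 by norm_num, Nat.and_two_pow_sub_one_eq_mod]

lemma pv_tb_sub (x i : Nat) : (65535 - x % 65536).testBit i = (decide (i < 16) && !x.testBit i) := by
  have hsub : (x % 65536) &&& 65535 = x % 65536 := by rw [pv_and_65535]; omega
  rw [pv_sub_xor 65535 (x % 65536) hsub, Nat.testBit_xor, pv_tb_65535, pv_tb_mod]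
  cases h1 : decide (i < 16) <;> cases h2 : x.testBit i <;> rfl

lemma pv_mod_xor (x y : Nat) : (x ^^^ y) % 65536 = x % 65536 ^^^ y % 65536 := by
  apply Nat.eq_of_testBit_eq
  intro i
  simp only [pv_tb_mod, Nat.testBit_xor]
  cases h1 : decide (i < 16) <;> cases h2 : x.testBit i <;> cases h3 : y.testBit i <;> rfl

-- ---- pvLow arithmetic ----
lemma pvLow_lt (x : Int) : pvLow x < 65536 := by unfold pvLow; omega

lemma pvLow_coe (m : Nat) (h : m < 65536) : pvLow (↑m) = m := by unfold pvLow; omega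

lemma pvLow_cast (m : Nat) : pvLow (↑m) = m % 65536 := by unfold pvLow; omega

lemma pvLow_nonneg (a : Int) (ha : 0 ≤ a) : pvLow a = a.toNat % 65536 := by unfold pvLow; omega

lemma pvLow_neg (a : Int) (ha : a < 0) : pvLow a = 65535 - (-a - 1).toNat % 65536 := by
  unfold pvLow; omega

lemma pvLow_negSucc (X : Nat) : pvLow (-(X:Int) - 1) = 65535 - X % 65536 := by
  unfold pvLow; omega

-- ---- PySem bridges ----
lemma pv_band_low (a : Int) (n : Nat) (hn : n < 65536) : PySem.Int.band a (↑n) = ↑(pvLow a &&& n) := by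
  unfold PySem.Int.band
  by_cases ha : 0 ≤ a
  · rw [if_pos ha, if_pos (Int.natCast_nonneg n)]
    rw [pvLow_nonneg a ha, Int.toNat_natCast]
    congr 1
    apply Nat.eq_of_testBit_eq
    intro i
    simp only [Nat.testBit_and, pv_tb_mod]
    by_cases hi : i < 16
    · simp [hi]
    · simp [hi, pv_tb_high i hn (by omega)]
  · rw [if_neg ha, if_pos (Int.natCast_nonneg n)]
    rw [pvLow_neg a (by omega), Int.toNat_natCast]
    congr 1
    set N := (-a - 1).toNat with hN
    have h1 : (n &&& N) &&& n = n &&& N := by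
      apply Nat.eq_of_testBit_eq
      intro i
      simp only [Nat.testBit_and]
      cases hn' : n.testBit i <;> cases hN' : N.testBit i <;> rfl
    rw [pv_sub_xor n (n &&& N) h1]
    apply Nat.eq_of_testBit_eq
    intro i
    simp only [Nat.testBit_xor, Nat.testBit_and, pv_tb_sub]
    by_cases hi : i < 16
    · simp only [hi, decide_true, Bool.true_and]
      cases hn' : n.testBit i <;> cases hN' : N.testBit i <;> rfl
    · simp [hi, pv_tb_high i hn (by omega)]

lemma pv_band_65535 (a : Int) : PySem.Int.band a 65535 = ↑(pvLow a) := by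
  have h := pv_band_low a 65535 (by norm_num)
  have h2 : pvLow a &&& 65535 = pvLow a := by
    rw [pv_and_65535]
    have := pvLow_lt a
    omega
  rw [h2] at h
  exact_mod_cast h

lemma pv_band_255 (a : Int) : PySem.Int.band a 255 = ↑(pvLow a &&& 255) := by
  have h := pv_band_low a 255 (by norm_num)
  exact_mod_cast h

lemma pv_band_32768_ne (x : Int) : (PySem.Int.band x 32768 ≠ 0) ↔ (pvLow x).testBit 15 = true := by
  have h := pv_band_low x 32768 (by norm_num)
  have h32 : (32768 : Int) = ((32768 : Nat) : Int) := by norm_num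
  rw [h32, h]
  have h2 : pvLow x &&& 32768 = ((pvLow x).testBit 15).toNat * 32768 := by
    have h3 := Nat.and_two_pow (pvLow x) 15
    norm_num at h3
    exact h3
  rw [h2]
  cases hb : (pvLow x).testBit 15 <;> simp

lemma pv_bxor_low (a b : Int) : pvLow (PySem.Int.bxor a b) = pvLow a ^^^ pvLow b := by
  unfold PySem.Int.bxor
  by_cases ha : 0 ≤ a <;> by_cases hb : 0 ≤ b
  · rw [if_pos ha, if_pos hb, pvLow_cast, pvLow_nonneg a ha, pvLow_nonneg b hb, pv_mod_xor]
  · rw [if_pos ha, if_neg hb, show -(↑(a.toNat ^^^ (-b - 1).toNat) : Int) - 1 = -(↑(a.toNat ^^^ (-b - 1).toNat) : Int) - 1 from rfl,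
        pvLow_negSucc, pvLow_nonneg a ha, pvLow_neg b (by omega)]
    apply Nat.eq_of_testBit_eq
    intro i
    simp only [pv_tb_sub, pv_tb_mod, Nat.testBit_xor]
    by_cases hi : i < 16
    · simp only [hi, decide_true, Bool.true_and]
      cases h1 : a.toNat.testBit i <;> cases h2 : (-b - 1).toNat.testBit i <;> rfl
    · simp [hi]
  · rw [if_neg ha, if_pos hb, pvLow_negSucc, pvLow_neg a (by omega), pvLow_nonneg b hb]
    apply Nat.eq_of_testBit_eq
    intro i
    simp only [pv_tb_sub, pv_tb_mod, Nat.testBit_xor]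
    by_cases hi : i < 16
    · simp only [hi, decide_true, Bool.true_and]
      cases h1 : (-a - 1).toNat.testBit i <;> cases h2 : b.toNat.testBit i <;> rfl
    · simp [hi]
  · rw [if_neg ha, if_neg hb, pvLow_cast, pvLow_neg a (by omega), pvLow_neg b (by omega)]
    apply Nat.eq_of_testBit_eq
    intro i
    simp only [pv_tb_sub, pv_tb_mod, Nat.testBit_xor]
    by_cases hi : i < 16
    · simp only [hi, decide_true, Bool.true_and]
      cases h1 : (-a - 1).toNat.testBit i <;> cases h2 : (-b - 1).toNat.testBit i <;> rfl
    · simp [hi]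

lemma pv_shift1_low (x : Int) : pvLow (x <<< (1:Nat)) = (2 * pvLow x) % 65536 := by
  rw [Int.shiftLeft_eq]
  have h : (2:Int)^(1:Nat) = 2 := by norm_num
  rw [h]
  unfold pvLow
  omega

lemma pv_shift8_low (x : Int) : pvLow (x <<< (8:Nat)) = (256 * pvLow x) % 65536 := by
  rw [Int.shiftLeft_eq]
  have h : (2:Int)^(8:Nat) = 256 := by norm_num
  rw [h]
  unfold pvLow
  omega

lemma pv_shiftr8 (x : Int) : PySem.Int.band (x >>> (8:Nat)) 255 = ↑(pvLow x / 256) := by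
  rw [pv_band_255]
  congr 1
  rw [pv_and_255, Int.shiftRight_eq_div_pow]
  have h : ((2^8 : Nat) : Int) = 256 := by norm_num
  rw [h]
  unfold pvLow
  omega

-- ---- step / iteration correspondence ----
lemma pvNStep_lt (q c : Nat) (hq : q < 65536) : pvNStep q c < 65536 := by
  unfold pvNStep
  split
  · have hx : (2*c) % 65536 < 2^16 := by norm_num; omega
    have hq' : q < 2^16 := by norm_num; omega
    have := Nat.xor_lt_two_pow hx hq'
    norm_num at this
    omega
  · omega

lemma pvNIter_lt (n : Nat) : ∀ q c : Nat, q < 65536 → c < 65536 → pvNIter n q c < 65536 := by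
  induction n with
  | zero => intro q c hq hc; exact hc
  | succ n ih => intro q c hq hc; exact ih q _ hq (pvNStep_lt q c hq)

lemma pv_stepA_eq (p x : Int) : pvStepA p x = ↑(pvNStep (pvLow p) (pvLow x)) := by
  unfold pvStepA pvNStep
  by_cases h : PySem.Int.band x 32768 ≠ 0
  · have ht := (pv_band_32768_ne x).mp h
    rw [if_pos h, ht, if_pos rfl, pv_band_65535, pv_bxor_low, pv_shift1_low]
  · have ht : (pvLow x).testBit 15 = false := by
      cases hb : (pvLow x).testBit 15
      · rfl
      · exact absurd ((pv_band_32768_ne x).mpr hb) h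
    rw [if_neg h, ht, if_neg (by simp), pv_band_65535, pv_shift1_low]

-- Source B's conditional t-update expression equals A's inner-loop step
lemma pv_tstep_eq (p x : Int) :
    (if PySem.Int.band x 32768 ≠ 0 then PySem.Int.band (PySem.Int.bxor (x <<< (1:Nat)) p) 65535
     else PySem.Int.band (x <<< (1:Nat)) 65535) = pvStepA p x := by
  unfold pvStepA
  by_cases h : PySem.Int.band x 32768 ≠ 0 <;> simp [h]

lemma pv_foldl_const {α β : Type} (f : β → β) (l : List α) (x : β) :
    l.foldl (fun c _ => f c) x = f^[l.length] x := by
  induction l generalizing x with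
  | nil => rfl
  | cons y ys ih => simp [List.foldl, ih, Function.iterate_succ_apply]

lemma pv_iter_eq (p : Int) : ∀ (n : Nat) (x : Int),
    (fun c => pvStepA p c)^[n+1] x = ↑(pvNIter (n+1) (pvLow p) (pvLow x)) := by
  intro n
  induction n with
  | zero =>
    intro x
    exact pv_stepA_eq p x
  | succ n ih =>
    intro x
    rw [Function.iterate_succ_apply]
    have h1 : pvStepA p x = ↑(pvNStep (pvLow p) (pvLow x)) := pv_stepA_eq p x
    rw [h1, ih]
    congr 1
    have h2 : pvLow (↑(pvNStep (pvLow p) (pvLow x))) = pvNStep (pvLow p) (pvLow x) :=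
      pvLow_coe _ (pvNStep_lt _ _ (pvLow_lt p))
    rw [h2]
    rfl

lemma pv_inner_eq (p x : Int) : crcA_inner p x = ↑(pvNIter 8 (pvLow p) (pvLow x)) := by
  unfold crcA_inner
  rw [pv_foldl_const]
  rw [show (PySem.List.pyRange 0 8 1).length = 8 from by decide]
  exact pv_iter_eq p 7 x

-- ---- linearity of the 8-step loop in the low bits (byte decomposition of A's inner loop) ----
lemma pv_nstep_lin (q a l : Nat) (hl : l < 32768) :
    pvNStep q (a ^^^ l) = pvNStep q a ^^^ (2*l) := by
  unfold pvNStep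
  have hb : (a ^^^ l).testBit 15 = a.testBit 15 := by
    have hl15 : l.testBit 15 = false := Nat.testBit_lt_two_pow (by norm_num; omega)
    simp [Nat.testBit_xor, hl15]
  have hmul : 2*(a ^^^ l) = 2*a ^^^ 2*l := by
    have h := @Nat.shiftLeft_xor_distrib 1 a l
    simpa [Nat.shiftLeft_eq, Nat.mul_comm] using h
  have hmod : (2*(a ^^^ l)) % 65536 = (2*a) % 65536 ^^^ 2*l := by
    rw [hmul, pv_mod_xor]
    congr 1
    omega
  rw [hb, hmod]
  split
  · rw [Nat.xor_assoc, Nat.xor_comm (2*l) q, ← Nat.xor_assoc]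
  · rfl

lemma pv_niter_lin : ∀ (n q a l : Nat), l * 2^n < 65536 →
    pvNIter n q (a ^^^ l) = pvNIter n q a ^^^ (l * 2^n) := by
  intro n
  induction n with
  | zero => intro q a l h; simp [pvNIter]
  | succ n ih =>
    intro q a l h
    have h2 : 2*l * 2^n = l * 2^(n+1) := by rw [pow_succ]; ring
    have hl : l < 32768 := by
      have hle : l * 2 ≤ l * 2^(n+1) := by
        apply Nat.mul_le_mul_left
        have : (2:Nat)^1 ≤ 2^(n+1) := Nat.pow_le_pow_right (by norm_num) (by omega)
        simpa using this
      omega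
    show pvNIter n q (pvNStep q (a ^^^ l)) = pvNIter n q (pvNStep q a) ^^^ (l * 2^(n+1))
    rw [pv_nstep_lin q a l hl, ih q (pvNStep q a) (2*l) (by omega), h2]

-- the classic byte decomposition: 8 iterations from c = 8 iterations from c's high byte, XOR c shifted
lemma pv_byte (q c : Nat) :
    pvNIter 8 q c = ((256*c) % 65536) ^^^ pvNIter 8 q (256*(c/256)) := by
  have hdisj : (256*(c/256)) &&& (c % 256) = 0 := by
    apply Nat.eq_of_testBit_eq
    intro i
    simp only [Nat.testBit_and, Nat.zero_testBit]
    by_cases hi : i < 8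
    · have hhi : (256*(c/256)).testBit i = false := by
        have h := Nat.testBit_mul_two_pow (c/256) i 8
        norm_num at h
        rw [Nat.mul_comm] at h ⊢
        rw [Nat.mul_comm (c/256) 256, h]
        simp [Nat.not_le.mpr hi]
      simp [hhi]
    · have hlo : (c % 256).testBit i = false := by
        rw [show (256:Nat) = 2^8 by norm_num, Nat.testBit_mod_two_pow]
        simp [hi]
      simp [hlo]
  have hsum : 256*(c/256) + c % 256 = c := by omega
  have hdec : c = (256*(c/256)) ^^^ (c % 256) := by
    rw [← pv_add_disj _ _ hdisj, hsum]
  have hlin := pv_niter_lin 8 q (256*(c/256)) (c % 256) (by norm_num; omega)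
  calc pvNIter 8 q c = pvNIter 8 q ((256*(c/256)) ^^^ (c % 256)) := by rw [← hdec]
    _ = pvNIter 8 q (256*(c/256)) ^^^ ((c % 256) * 2^8) := hlin
    _ = ((256*c) % 65536) ^^^ pvNIter 8 q (256*(c/256)) := by
        rw [Nat.xor_comm]
        congr 1
        norm_num
        omega

-- ---- GF(2) linearity of the 8-step map (what justifies B's doubling construction) ----
lemma pvNStep_xor (q a b : Nat) : pvNStep q (a ^^^ b) = pvNStep q a ^^^ pvNStep q b := by
  unfold pvNStep
  have hmul : 2*(a ^^^ b) = 2*a ^^^ 2*b := by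
    have h := @Nat.shiftLeft_xor_distrib 1 a b
    simpa [Nat.shiftLeft_eq, Nat.mul_comm] using h
  have hmod : (2*(a ^^^ b)) % 65536 = (2*a) % 65536 ^^^ (2*b) % 65536 := by
    rw [hmul, pv_mod_xor]
  rw [Nat.testBit_xor, hmod]
  cases a.testBit 15 <;> cases b.testBit 15 <;> simp <;>
    (apply Nat.eq_of_testBit_eq; intro i;
     simp only [Nat.testBit_xor];
     cases h1 : ((2*a) % 65536).testBit i <;> cases h2 : ((2*b) % 65536).testBit i <;>
       cases h3 : q.testBit i <;> rfl)

lemma pvNIter_xor (n : Nat) : ∀ q a b : Nat,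
    pvNIter n q (a ^^^ b) = pvNIter n q a ^^^ pvNIter n q b := by
  induction n with
  | zero => intro q a b; rfl
  | succ n ih =>
    intro q a b
    show pvNIter n q (pvNStep q (a ^^^ b)) = pvNIter n q (pvNStep q a) ^^^ pvNIter n q (pvNStep q b)
    rw [pvNStep_xor, ih]

lemma pvNStep_small (q c : Nat) (h : c < 32768) : pvNStep q c = (2*c) % 65536 := by
  unfold pvNStep
  rw [Nat.testBit_lt_two_pow (show c < 2^15 by omega)]
  simp

lemma pvNIter_zero (n q : Nat) : pvNIter n q 0 = 0 := by
  induction n with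
  | zero => rfl
  | succ n ih =>
    show pvNIter n q (pvNStep q 0) = 0
    rw [pvNStep_small q 0 (by omega)]
    simpa using ih

-- E 1: the table entry of index 1 is the (masked) polynomial itself
lemma pvE_one (q : Nat) : pvNIter 8 q 256 = q := by
  simp only [pvNIter]
  rw [pvNStep_small q 256 (by omega)]; norm_num
  rw [pvNStep_small q 512 (by omega)]; norm_num
  rw [pvNStep_small q 1024 (by omega)]; norm_num
  rw [pvNStep_small q 2048 (by omega)]; norm_num
  rw [pvNStep_small q 4096 (by omega)]; norm_num
  rw [pvNStep_small q 8192 (by omega)]; norm_num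
  rw [pvNStep_small q 16384 (by omega)]; norm_num
  unfold pvNStep
  rw [show Nat.testBit 32768 15 = true from by decide, if_pos rfl]
  norm_num

lemma pvStep_comm (q : Nat) : ∀ n c, pvNStep q (pvNIter n q c) = pvNIter n q (pvNStep q c) := by
  intro n
  induction n with
  | zero => intro c; rfl
  | succ n ih =>
    intro c
    show pvNStep q (pvNIter n q (pvNStep q c)) = pvNIter n q (pvNStep q (pvNStep q c))
    exact ih (pvNStep q c)

-- table entry of the next power of two = one step of the previous one
lemma pvE_double (q n : Nat) (hn : n ≤ 6) :
    pvNStep q (pvNIter 8 q (256*2^n)) = pvNIter 8 q (256*2^(n+1)) := by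
  rw [pvStep_comm]
  congr 1
  have hb : 2^n ≤ 64 := by
    calc (2:Nat)^n ≤ 2^6 := Nat.pow_le_pow_right (by norm_num) hn
      _ = 64 := by norm_num
  rw [pvNStep_small q (256*2^n) (by omega)]
  have : 2*(256*2^n) = 256*2^(n+1) := by rw [pow_succ]; ring
  rw [this, Nat.mod_eq_of_lt (by rw [pow_succ]; omega)]

-- table entry of a split index: E (2^n + j) = E (2^n) ^^^ E j for j < 2^n
lemma pvE_split (q n j : Nat) (hj : j < 2^n) :
    pvNIter 8 q (256*(2^n + j)) = pvNIter 8 q (256*2^n) ^^^ pvNIter 8 q (256*j) := by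
  have hpow : 256*2^n = 2^(n+8) := by rw [pow_add]; ring
  have hlt : 256*j < 2^(n+8) := by rw [← hpow]; omega
  have hdisj : (2^(n+8)) &&& (256*j) = 0 := by
    apply Nat.eq_of_testBit_eq
    intro i
    simp only [Nat.testBit_and, Nat.zero_testBit]
    by_cases hi : i = n+8
    · subst hi
      rw [Nat.testBit_lt_two_pow hlt]
      simp
    · rw [Nat.testBit_two_pow]
      simp [Ne.symm hi]
  have hadd : 256*(2^n + j) = 2^(n+8) ^^^ 256*j := by
    rw [← pv_add_disj _ _ hdisj, ← hpow]
    ring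
  rw [hadd, pvNIter_xor, hpow]

-- ---- B's table equals the map of the Nat model ----
-- one round of Source B's build loop, as a plain function of the state
def pvBF (p : Int) (st : List Int × Int) : List Int × Int :=
  (st.1 ++ st.1.map (fun e => PySem.Int.bxor st.2 e),
   if PySem.Int.band st.2 32768 ≠ 0 then PySem.Int.band (PySem.Int.bxor (st.2 <<< (1:Nat)) p) 65535
   else PySem.Int.band (st.2 <<< (1:Nat)) 65535)

lemma pv_table_iter (p : Int) :
    crcB_table p = ((pvBF p)^[8] ([0], PySem.Int.band p 65535)).1 := by
  unfold crcB_table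
  rw [show (PySem.List.pyRange 0 8 1) = [0,1,2,3,4,5,6,7] from by decide]
  rfl

lemma pv_build (p : Int) : ∀ n, n ≤ 8 →
    ((pvBF p)^[n] ([0], PySem.Int.band p 65535)).1
      = (List.range (2^n)).map (fun j => ((pvNIter 8 (pvLow p) (256*j) : Nat) : Int))
    ∧ (n ≤ 7 → ((pvBF p)^[n] ([0], PySem.Int.band p 65535)).2
      = ((pvNIter 8 (pvLow p) (256*2^n) : Nat) : Int)) := by
  intro n
  induction n with
  | zero =>
    intro _
    constructor
    · simp [pvNIter_zero]
    · intro _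
      simp only [Function.iterate_zero, id]
      rw [pv_band_65535]
      norm_num [pvE_one]
  | succ n ih =>
    intro h
    obtain ⟨h1, h2⟩ := ih (by omega)
    have ht := h2 (by omega)
    rw [Function.iterate_succ_apply']
    set st := (pvBF p)^[n] ([0], PySem.Int.band p 65535) with hst
    constructor
    · show st.1 ++ st.1.map (fun e => PySem.Int.bxor st.2 e) = _
      rw [h1, ht, List.map_map]
      have hrange : List.range (2^(n+1)) = List.range (2^n) ++ (List.range (2^n)).map (2^n + ·) := by
        rw [show (2:Nat)^(n+1) = 2^n + 2^n from by rw [pow_succ]; ring, List.range_add]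
      rw [hrange, List.map_append, List.map_map]
      congr 1
      apply List.map_congr_left
      intro j hj
      rw [List.mem_range] at hj
      show PySem.Int.bxor _ _ = _
      rw [PySem.Int.bxor_natCast]
      rw [Function.comp_apply, pvE_split (pvLow p) n j hj]
    · intro hn7
      show (if PySem.Int.band st.2 32768 ≠ 0 then PySem.Int.band (PySem.Int.bxor (st.2 <<< (1:Nat)) p) 65535
            else PySem.Int.band (st.2 <<< (1:Nat)) 65535) = _
      rw [pv_tstep_eq, pv_stepA_eq, ht, pvLow_coe]
      · rw [pvE_double (pvLow p) n (by omega)]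
      · exact pvNIter_lt 8 _ _ (pvLow_lt p) (by
          have : 2^n ≤ 128 := by
            calc (2:Nat)^n ≤ 2^7 := Nat.pow_le_pow_right (by norm_num) (by omega)
              _ = 128 := by norm_num
          omega)

lemma pv_table_eq (p : Int) :
    crcB_table p = (List.range 256).map (fun j => ((pvNIter 8 (pvLow p) (256*j) : Nat) : Int)) := by
  rw [pv_table_iter]
  have := (pv_build p 8 (by omega)).1
  norm_num at this ⊢
  exact this

-- ---- B's per-character step computes A's inner loop ----
lemma pv_stepB_inner (p t : Int) :
    PySem.Int.band (PySem.Int.bxor (t <<< (8:Nat))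
      ((PySem.List.pyGet? (crcB_table p) (PySem.Int.band (t >>> (8:Nat)) 255)).getD 0)) 65535
    = crcA_inner p t := by
  rw [pv_shiftr8]
  set j := pvLow t / 256 with hj
  have hjlt : j < 256 := by
    have := pvLow_lt t
    omega
  have hget : PySem.List.pyGet? (crcB_table p) (↑j)
      = some ((pvNIter 8 (pvLow p) (256*j) : Nat) : Int) := by
    rw [pv_table_eq, PySem.List.pyGet?_natCast]
    simp [List.getElem?_map, List.getElem?_range hjlt]
  rw [hget]
  simp only [Option.getD_some]
  rw [pv_inner_eq p t, pv_band_65535, pv_bxor_low, pv_shift8_low,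
      pvLow_coe _ (pvNIter_lt 8 (pvLow p) (256*j) (pvLow_lt p) (by omega))]
  exact congrArg _ (pv_byte (pvLow p) (pvLow t)).symm

-- ---- B's fold over the characters equals A's recursion ----
lemma pv_foldl_none (tbl : List Int) : ∀ cs : List Char,
    cs.foldl (crcB_step tbl) none = none := by
  intro cs
  induction cs with
  | nil => rfl
  | cons b rest ih => simpa [crcB_step] using ih

lemma pv_go_eq (p : Int) : ∀ (cs : List Char) (x : Int),
    cs.foldl (crcB_step (crcB_table p)) (some x) = crcA_go p cs x := by
  intro cs
  induction cs with
  | nil => intro x; rfl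
  | cons b rest ih =>
    intro x
    rw [List.foldl_cons]
    unfold crcA_go
    cases h : PySem.Int.ofStr? (String.mk [b]) with
    | none =>
      rw [show crcB_step (crcB_table p) (some x) b = none from by simp [crcB_step, h]]
      exact pv_foldl_none (crcB_table p) rest
    | some d =>
      rw [show crcB_step (crcB_table p) (some x) b
          = some (crcA_inner p (PySem.Int.bxor x (d <<< (15:Nat)))) from by
        simp only [crcB_step, Option.bind_some, h, Option.map_some]
        rw [pv_stepB_inner p (PySem.Int.bxor x (d <<< (15:Nat)))]]
      exact ih _

-- ===== VERDICT (by name: the statement is the Claim_ definition above) =====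
theorem crc_ccitt_spec : Claim_equal_crc_ccitt := by
  unfold Claim_equal_crc_ccitt
  intro data poly init_crc _ _
  unfold Spec_crc_ccitt crc_ccitt crc_ccitt_alt
  rw [pv_go_eq]
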